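-- pv_equiv track=rewrite | github.com/TopazBTW/CarPriceAvalaiblty | backend/utils/complete_dataset_generator.py | get_brand_category
-- ===== SOURCE A (Python) =====
-- def get_brand_category(brand):
--     """Get brand category"""
--     categories = {
--         'premium': ['BMW', 'AUDI', 'MERCEDES-BENZ', 'PORSCHE', 'LEXUS', 'JAGUAR', 'LAND-ROVER', 'VOLVO', 'MINI'],
--         'japanese': ['TOYOTA', 'HONDA', 'NISSAN', 'MAZDA', 'LEXUS'],
--         'korean': ['HYUNDAI', 'KIA'],
--         'german': ['BMW', 'AUDI', 'MERCEDES-BENZ', 'VOLKSWAGEN', 'PORSCHE', 'SKODA'],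
--         'french': ['PEUGEOT', 'CITROEN', 'RENAULT', 'DACIA'],
--         'american': ['FORD', 'JEEP'],
--         'chinese': ['MG', 'BYD', 'GEELY', 'CHANGAN'],
--         'electric': ['BYD', 'TESLA'],
--         'italian': ['FIAT', 'ALFA-ROMEO']
--     }
--
--     for category, brand_list in categories.items():
--         if brand in brand_list:
--             return category
--
--     return 'generaliste'
-- ===== SOURCE B (Python) =====
-- # Flat brand -> category lookup table (first category wins for brands listed
-- # in several categories, matching the original iteration order).
-- _BRAND_TO_CATEGORY = {
--     'BMW': 'premium', 'AUDI': 'premium', 'MERCEDES-BENZ': 'premium',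
--     'PORSCHE': 'premium', 'LEXUS': 'premium', 'JAGUAR': 'premium',
--     'LAND-ROVER': 'premium', 'VOLVO': 'premium', 'MINI': 'premium',
--     'TOYOTA': 'japanese', 'HONDA': 'japanese', 'NISSAN': 'japanese',
--     'MAZDA': 'japanese',
--     'HYUNDAI': 'korean', 'KIA': 'korean',
--     'VOLKSWAGEN': 'german', 'SKODA': 'german',
--     'PEUGEOT': 'french', 'CITROEN': 'french', 'RENAULT': 'french',
--     'DACIA': 'french',
--     'FORD': 'american', 'JEEP': 'american',
--     'MG': 'chinese', 'BYD': 'chinese', 'GEELY': 'chinese',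
--     'CHANGAN': 'chinese',
--     'TESLA': 'electric',
--     'FIAT': 'italian', 'ALFA-ROMEO': 'italian',
-- }
--
--
-- def get_brand_category(brand):
--     """Get brand category"""
--     return _BRAND_TO_CATEGORY.get(brand, 'generaliste')
-- ===== Notes on version B (the rewrite author's own statement) =====
-- stated objective: faster
-- what changed: Replaces the per-call scan over the category dict with membership tests on each brand list by a single flat brand-to-category dict (written with the first category winning for brands appearing in several categories, matching A's tie-break) and one dict lookup per call.
import Mathlib
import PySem

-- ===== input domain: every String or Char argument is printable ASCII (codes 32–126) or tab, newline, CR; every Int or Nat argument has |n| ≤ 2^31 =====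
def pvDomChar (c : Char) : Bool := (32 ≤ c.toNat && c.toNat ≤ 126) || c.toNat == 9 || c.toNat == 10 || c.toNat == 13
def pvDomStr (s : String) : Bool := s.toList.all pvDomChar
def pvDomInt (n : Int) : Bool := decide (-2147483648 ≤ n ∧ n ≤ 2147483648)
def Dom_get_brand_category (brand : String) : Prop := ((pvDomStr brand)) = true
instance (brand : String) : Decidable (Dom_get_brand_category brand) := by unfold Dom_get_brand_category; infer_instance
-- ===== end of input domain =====

-- B replaces A's per-call scan (per-category membership tests) by a single flat
-- brand→category dict, written with the first category winning, and one lookup per call.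

-- ===== PORT A =====
-- the literal categories dict of A, as an insertion-ordered association list
def pvCategories : List (String × List String) :=
  [("premium", ["BMW", "AUDI", "MERCEDES-BENZ", "PORSCHE", "LEXUS", "JAGUAR", "LAND-ROVER", "VOLVO", "MINI"]),
   ("japanese", ["TOYOTA", "HONDA", "NISSAN", "MAZDA", "LEXUS"]),
   ("korean", ["HYUNDAI", "KIA"]),
   ("german", ["BMW", "AUDI", "MERCEDES-BENZ", "VOLKSWAGEN", "PORSCHE", "SKODA"]),
   ("french", ["PEUGEOT", "CITROEN", "RENAULT", "DACIA"]),
   ("american", ["FORD", "JEEP"]),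
   ("chinese", ["MG", "BYD", "GEELY", "CHANGAN"]),
   ("electric", ["BYD", "TESLA"]),
   ("italian", ["FIAT", "ALFA-ROMEO"])]

-- the 'for category, brand_list in categories.items(): if brand in brand_list: return category' loop
def pvLoopA (brand : String) : List (String × List String) → String
  | [] => "generaliste"
  | (category, brand_list) :: rest =>
      if brand ∈ brand_list then category else pvLoopA brand rest

def get_brand_category (brand : String) : String := pvLoopA brand pvCategories

-- ===== PORT B =====
-- Source B's literal flat dict _BRAND_TO_CATEGORY (keys are distinct)
def pvBrandToCategory : PySem.Dict String String :=
  PySem.Dict.mk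
  [("BMW", "premium"), ("AUDI", "premium"), ("MERCEDES-BENZ", "premium"),
   ("PORSCHE", "premium"), ("LEXUS", "premium"), ("JAGUAR", "premium"),
   ("LAND-ROVER", "premium"), ("VOLVO", "premium"), ("MINI", "premium"),
   ("TOYOTA", "japanese"), ("HONDA", "japanese"), ("NISSAN", "japanese"),
   ("MAZDA", "japanese"),
   ("HYUNDAI", "korean"), ("KIA", "korean"),
   ("VOLKSWAGEN", "german"), ("SKODA", "german"),
   ("PEUGEOT", "french"), ("CITROEN", "french"), ("RENAULT", "french"),
   ("DACIA", "french"),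
   ("FORD", "american"), ("JEEP", "american"),
   ("MG", "chinese"), ("BYD", "chinese"), ("GEELY", "chinese"),
   ("CHANGAN", "chinese"),
   ("TESLA", "electric"),
   ("FIAT", "italian"), ("ALFA-ROMEO", "italian")]

def get_brand_category_alt (brand : String) : String :=
  pvBrandToCategory.getD brand "generaliste"

-- ===== PRECONDITION & SPEC =====
def Spec_get_brand_category (brand : String) (out : String) : Prop := out = get_brand_category_alt brand
instance (brand : String) (out : String) : Decidable (Spec_get_brand_category brand out) := by unfold Spec_get_brand_category; infer_instance

-- ===== CLAIM (what is proved, stated in full; the proofs are below) =====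
def Claim_equal_get_brand_category : Prop := ∀ (brand : String), Dom_get_brand_category brand → Spec_get_brand_category brand (get_brand_category brand)

-- ===== LEMMAS AND PROOFS =====

-- every brand occurring in pvCategories' brand lists (= the keys of pvBrandToCategory)
def pvAllBrands : List String :=
  ["BMW", "AUDI", "MERCEDES-BENZ", "PORSCHE", "LEXUS", "JAGUAR", "LAND-ROVER", "VOLVO", "MINI", "TOYOTA", "HONDA", "NISSAN", "MAZDA", "HYUNDAI", "KIA", "VOLKSWAGEN", "SKODA", "PEUGEOT", "CITROEN", "RENAULT", "DACIA", "FORD", "JEEP", "MG", "BYD", "GEELY", "CHANGAN", "TESLA", "FIAT", "ALFA-ROMEO"]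

-- ===== VERDICT (by name: the statement is the Claim_ definition above) =====
theorem get_brand_category_spec : Claim_equal_get_brand_category := by
  intro brand _
  show get_brand_category brand = get_brand_category_alt brand
  by_cases hmem : brand ∈ pvAllBrands
  · -- a known brand: 30 literal cases, each checked by evaluation
    simp only [pvAllBrands, List.mem_cons, List.not_mem_nil, or_false] at hmem
    rcases hmem with h|h|h|h|h|h|h|h|h|h|h|h|h|h|h|h|h|h|h|h|h|h|h|h|h|h|h|h|h|h <;>
      subst h <;> decide
  · -- an unknown brand: every membership test and every key comparison fails
    simp only [pvAllBrands, List.mem_cons, List.not_mem_nil, or_false, not_or] at hmem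
    obtain ⟨h1,h2,h3,h4,h5,h6,h7,h8,h9,h10,h11,h12,h13,h14,h15,h16,h17,h18,h19,h20,h21,h22,h23,h24,h25,h26,h27,h28,h29,h30⟩ := hmem
    simp [get_brand_category, get_brand_category_alt, pvLoopA, pvCategories,
      pvBrandToCategory, PySem.Dict.getD, PySem.Dict.get?, beq_iff_eq,
      h1,h2,h3,h4,h5,h6,h7,h8,h9,h10,h11,h12,h13,h14,h15,h16,h17,h18,h19,h20,
      h21,h22,h23,h24,h25,h26,h27,h28,h29,h30,
      Ne.symm h1, Ne.symm h2, Ne.symm h3, Ne.symm h4, Ne.symm h5, Ne.symm h6,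
      Ne.symm h7, Ne.symm h8, Ne.symm h9, Ne.symm h10, Ne.symm h11, Ne.symm h12,
      Ne.symm h13, Ne.symm h14, Ne.symm h15, Ne.symm h16, Ne.symm h17, Ne.symm h18,
      Ne.symm h19, Ne.symm h20, Ne.symm h21, Ne.symm h22, Ne.symm h23, Ne.symm h24,
      Ne.symm h25, Ne.symm h26, Ne.symm h27, Ne.symm h28, Ne.symm h29, Ne.symm h30]
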